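-- pv_equiv track=rewrite | github.com/Dan-Vasquez/Semestre_6 | Analisis_Y_Diseños_De_Algoritmos/Tarea_3_ADA/customer.py | customer
-- ===== SOURCE A (Python) =====
-- from heapq import heappush, heappop
--
-- def customer(ordenes, cantidad_ordenes):
--
--     ordenes_aceptadas = []
--     tiempo_transcurrido = 0
--     for i in range(cantidad_ordenes):
--         toneladas_acero = ordenes[i][0]
--         fecha_vencimiento = ordenes[i][1]
--         tiempo_transcurrido += toneladas_acero
--         heappush(ordenes_aceptadas, -toneladas_acero)
--         if tiempo_transcurrido > fecha_vencimiento: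
--             tiempo_transcurrido += heappop(ordenes_aceptadas)
--
--     return len(ordenes_aceptadas)
-- ===== SOURCE B (Python) =====
-- def customer(ordenes, cantidad_ordenes):
--     ordenes_aceptadas = []
--     tiempo_transcurrido = 0
--     for i in range(cantidad_ordenes):
--         toneladas_acero = ordenes[i][0]
--         fecha_vencimiento = ordenes[i][1]
--         ordenes_aceptadas.append(toneladas_acero)
--         tiempo_transcurrido += toneladas_acero
--         if tiempo_transcurrido > fecha_vencimiento:
--             m = max(ordenes_aceptadas)
--             tiempo_transcurrido -= m
--             ordenes_aceptadas.remove(m)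
--     return len(ordenes_aceptadas)
-- ===== Notes on version B (the rewrite author's own statement) =====
-- stated objective: simpler
-- what changed: Replaces the negated-value binary min-heap (heappush/heappop) by a plain list of accepted tonnages with a linear max()+remove() eviction of the largest accepted order; same greedy, no heap.
import Mathlib
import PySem

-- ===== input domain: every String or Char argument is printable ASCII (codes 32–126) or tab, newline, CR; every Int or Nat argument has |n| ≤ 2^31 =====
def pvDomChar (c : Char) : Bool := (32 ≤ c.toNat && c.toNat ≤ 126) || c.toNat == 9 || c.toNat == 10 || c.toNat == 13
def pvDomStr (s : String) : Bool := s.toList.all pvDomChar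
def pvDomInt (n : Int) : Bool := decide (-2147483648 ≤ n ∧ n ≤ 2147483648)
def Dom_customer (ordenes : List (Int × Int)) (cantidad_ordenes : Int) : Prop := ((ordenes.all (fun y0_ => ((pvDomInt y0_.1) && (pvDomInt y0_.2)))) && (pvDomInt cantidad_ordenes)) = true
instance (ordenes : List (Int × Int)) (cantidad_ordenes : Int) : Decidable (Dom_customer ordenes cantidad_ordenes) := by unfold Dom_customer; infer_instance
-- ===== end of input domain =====

-- B replaces A's negated-value binary min-heap (CPython heapq, ported literally) by a plain
-- list of accepted tonnages with a linear max()+remove() eviction; same greedy count, no heap.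

-- ===== PORT A =====
-- exact port of CPython heapq._siftdown(heap, startpos, pos) with newitem = heap[pos]
def pvSiftdownLoop (heap : List Int) (startpos pos : Nat) (newitem : Int) : List Int :=
  if _h : startpos < pos then
    let parentpos := (pos - 1) / 2
    let parent := heap.getD parentpos 0
    if newitem < parent then
      pvSiftdownLoop (heap.set pos parent) startpos parentpos newitem
    else
      heap.set pos newitem
  else
    heap.set pos newitem
termination_by pos
decreasing_by omega

def pvSiftdown (heap : List Int) (startpos pos : Nat) : List Int :=
  pvSiftdownLoop heap startpos pos (heap.getD pos 0)

-- heapq.heappush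
def pvHeappush (heap : List Int) (item : Int) : List Int :=
  pvSiftdown (heap ++ [item]) 0 heap.length

-- exact port of CPython heapq._siftup(heap, pos): move the hole to a leaf, then _siftdown
def pvSiftupLoop (heap : List Int) (startpos pos : Nat) (newitem : Int) : List Int :=
  let endpos := heap.length
  let childpos := 2 * pos + 1
  if _h : childpos < endpos then
    let rightpos := childpos + 1
    let childpos := if rightpos < endpos ∧ ¬ (heap.getD childpos 0 < heap.getD rightpos 0) then rightpos else childpos
    pvSiftupLoop (heap.set pos (heap.getD childpos 0)) startpos childpos newitem
  else
    pvSiftdownLoop (heap.set pos newitem) startpos pos newitem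
termination_by heap.length - pos
decreasing_by simp only [List.length_set]; split <;> omega

-- heapq.heappop (A only calls it on a nonempty heap)
def pvHeappop (heap : List Int) : Int × List Int :=
  let lastelt := heap.getLast?.getD 0
  let rest := heap.dropLast
  if rest ≠ [] then
    let returnitem := rest.getD 0 0
    (returnitem, pvSiftupLoop (rest.set 0 lastelt) 0 0 lastelt)
  else
    (lastelt, rest)

-- one iteration of A's for-loop, state = (ordenes_aceptadas, tiempo_transcurrido)
def pvStepA (ordenes : List (Int × Int)) (st : List Int × Int) (i : Int) : List Int × Int :=
  let orden := PySem.List.pyGetD ordenes i (0, 0)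
  let tiempo := st.2 + orden.1
  let heap := pvHeappush st.1 (-orden.1)
  if tiempo > orden.2 then
    let p := pvHeappop heap
    (p.2, tiempo + p.1)
  else
    (heap, tiempo)

def customer (ordenes : List (Int × Int)) (cantidad_ordenes : Int) : Int :=
  let st := (PySem.List.pyRange 0 cantidad_ordenes 1).foldl (pvStepA ordenes) ([], 0)
  (st.1.length : Int)

-- ===== PORT B =====
-- one iteration of B's for-loop, state = (ordenes_aceptadas, tiempo_transcurrido)
def pvStepB (ordenes : List (Int × Int)) (st : List Int × Int) (i : Int) : List Int × Int :=
  let orden := PySem.List.pyGetD ordenes i (0, 0)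
  let acc := st.1 ++ [orden.1]
  let tiempo := st.2 + orden.1
  if tiempo > orden.2 then
    let m := (PySem.List.max? acc (fun x => x)).getD 0
    ((PySem.List.remove? acc m).getD acc, tiempo - m)
  else
    (acc, tiempo)

def customer_alt (ordenes : List (Int × Int)) (cantidad_ordenes : Int) : Int :=
  let st := (PySem.List.pyRange 0 cantidad_ordenes 1).foldl (pvStepB ordenes) ([], 0)
  (st.1.length : Int)

-- ===== PRECONDITION & SPEC =====
-- Pre_ excludes only cantidad_ordenes > len(ordenes), where the Python A raises IndexError.
def Pre_customer (ordenes : List (Int × Int)) (cantidad_ordenes : Int) : Prop :=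
  cantidad_ordenes ≤ (ordenes.length : Int)
instance (ordenes : List (Int × Int)) (cantidad_ordenes : Int) : Decidable (Pre_customer ordenes cantidad_ordenes) := by unfold Pre_customer; infer_instance

def pvWitness_customer : (List (Int × Int)) × Int := ([(3, 3), (2, 4)], 2)

def Spec_customer (ordenes : List (Int × Int)) (cantidad_ordenes : Int) (out : Int) : Prop := out = customer_alt ordenes cantidad_ordenes
instance (ordenes : List (Int × Int)) (cantidad_ordenes : Int) (out : Int) : Decidable (Spec_customer ordenes cantidad_ordenes out) := by unfold Spec_customer; infer_instance

-- ===== CLAIM (what is proved, stated in full; the proofs are below) =====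
def Claim_equal_customer : Prop := ∀ (ordenes : List (Int × Int)) (cantidad_ordenes : Int), Dom_customer ordenes cantidad_ordenes → Pre_customer ordenes cantidad_ordenes → Spec_customer ordenes cantidad_ordenes (customer ordenes cantidad_ordenes)


-- ===== LEMMAS AND PROOFS =====

-- binary-heap property on the array encoding (parent of i is (i-1)/2)
def pvIsHeap (h : List Int) : Prop :=
  ∀ i, 0 < i → i < h.length → h.getD ((i - 1) / 2) 0 ≤ h.getD i 0

theorem pv_getD_set_ne (l : List Int) (q p : Nat) (a : Int) (h : q ≠ p) :
    (l.set q a).getD p 0 = l.getD p 0 := by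
  simp [List.getD_eq_getElem?_getD, List.getElem?_set_ne h]

theorem pv_getD_set_self (l : List Int) (q : Nat) (a : Int) (h : q < l.length) :
    (l.set q a).getD q 0 = a := by
  simp [List.getD_eq_getElem?_getD, List.getElem?_set_self h]

-- the root of a heap is a lower bound
theorem pv_root_le (h : List Int) (hh : pvIsHeap h) :
    ∀ i, i < h.length → h.getD 0 0 ≤ h.getD i 0 := by
  intro i
  induction i using Nat.strong_induction_on with
  | _ i ih =>
    intro hi
    rcases Nat.eq_zero_or_pos i with h0 | h0
    · subst h0; exact le_refl _
    · exact le_trans (ih ((i - 1) / 2) (by omega) (by omega)) (hh i h0 hi)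

theorem pv_root_le_mem (h : List Int) (hh : pvIsHeap h) (x : Int) (hx : x ∈ h) :
    h.getD 0 0 ≤ x := by
  obtain ⟨k, hk, rfl⟩ := List.getElem_of_mem hx
  rw [← List.getD_eq_getElem h 0 hk]
  exact pv_root_le h hh k hk

-- multiset view of List.set
theorem pv_mset_set (l : List Int) (p : Nat) (a : Int) (hp : p < l.length) :
    (↑(l.set p a) : Multiset Int) = a ::ₘ (↑l : Multiset Int).erase (l.getD p 0) := by
  rw [List.getD_eq_getElem l 0 hp]
  have h1 : (↑(l.set p a) : Multiset Int) = ↑(a :: l.eraseIdx p) :=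
    Multiset.coe_eq_coe.mpr (List.set_perm_cons_eraseIdx hp a)
  have h2 : (↑(l[p] :: l.eraseIdx p) : Multiset Int) = ↑l :=
    Multiset.coe_eq_coe.mpr (List.getElem_cons_eraseIdx_perm hp)
  rw [h1, ← h2]
  simp

theorem pv_mset_set_set (heap : List Int) (pos q : Nat) (a : Int)
    (hq : q ≠ pos) (hqlen : q < heap.length) (hp : pos < heap.length) :
    (↑((heap.set pos (heap.getD q 0)).set q a) : Multiset Int) = ↑(heap.set pos a) := by
  rw [pv_mset_set _ q a (by simpa using hqlen),
      pv_getD_set_ne heap pos q _ (fun h => hq h.symm),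
      pv_mset_set heap pos _ hp, pv_mset_set heap pos a hp]
  simp

theorem pv_siftdownLoop_mset : ∀ (pos : Nat) (heap : List Int) (startpos : Nat) (newitem : Int),
    pos < heap.length →
    (↑(pvSiftdownLoop heap startpos pos newitem) : Multiset Int) = ↑(heap.set pos newitem) := by
  intro pos
  induction pos using Nat.strong_induction_on with
  | _ pos ih =>
    intro heap startpos newitem hp
    unfold pvSiftdownLoop
    by_cases h1 : startpos < pos
    · simp only [dif_pos h1]
      by_cases h2 : newitem < heap.getD ((pos - 1) / 2) 0
      · simp only [if_pos h2]
        rw [ih ((pos - 1) / 2) (by omega) _ startpos newitem (by simp; omega)]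
        exact pv_mset_set_set heap pos ((pos - 1) / 2) newitem (by omega) (by omega) hp
      · simp only [if_neg h2]
    · simp only [dif_neg h1]

theorem pv_siftupLoop_mset : ∀ (n : Nat) (heap : List Int) (startpos pos : Nat) (newitem : Int),
    heap.length - pos = n → pos < heap.length →
    (↑(pvSiftupLoop heap startpos pos newitem) : Multiset Int) = ↑(heap.set pos newitem) := by
  intro n
  induction n using Nat.strong_induction_on with
  | _ n ih =>
    intro heap startpos pos newitem hn hp
    unfold pvSiftupLoop
    by_cases h1 : 2 * pos + 1 < heap.length
    · simp only [dif_pos h1]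
      by_cases h2 : 2 * pos + 1 + 1 < heap.length ∧
          ¬ heap.getD (2 * pos + 1) 0 < heap.getD (2 * pos + 1 + 1) 0
      · simp only [if_pos h2]
        rw [ih (heap.length - (2 * pos + 1 + 1)) (by omega) _ startpos _ newitem
              (by simp) (by simp; omega)]
        exact pv_mset_set_set heap pos (2 * pos + 1 + 1) newitem (by omega) (by omega) hp
      · simp only [if_neg h2]
        rw [ih (heap.length - (2 * pos + 1)) (by omega) _ startpos _ newitem
              (by simp) (by simp; omega)]
        exact pv_mset_set_set heap pos (2 * pos + 1) newitem (by omega) (by omega) hp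
    · simp only [dif_neg h1]
      rw [pv_siftdownLoop_mset pos _ startpos newitem (by simpa using hp)]
      simp

-- the sift invariants
def pvSDInv (h : List Int) (pos : Nat) (newitem : Int) : Prop :=
  (∀ i, 0 < i → i < h.length → i ≠ pos → (i - 1) / 2 ≠ pos →
      h.getD ((i - 1) / 2) 0 ≤ h.getD i 0) ∧
  (∀ j, 0 < j → j < h.length → (j - 1) / 2 = pos →
      newitem ≤ h.getD j 0 ∧ (0 < pos → h.getD ((pos - 1) / 2) 0 ≤ h.getD j 0))

theorem pv_siftdownLoop_heap : ∀ (pos : Nat) (heap : List Int) (newitem : Int),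
    pos < heap.length → pvSDInv heap pos newitem →
    pvIsHeap (pvSiftdownLoop heap 0 pos newitem) := by
  intro pos
  induction pos using Nat.strong_induction_on with
  | _ pos ih =>
    intro heap newitem hp hinv
    obtain ⟨ha, hb⟩ := hinv
    unfold pvSiftdownLoop
    by_cases h1 : 0 < pos
    · simp only [dif_pos h1]
      by_cases h2 : newitem < heap.getD ((pos - 1) / 2) 0
      · simp only [if_pos h2]
        apply ih ((pos - 1) / 2) (by omega) _ newitem (by simp; omega)
        constructor
        · intro i h0 hlen hne hpne
          simp only [List.length_set] at hlen
          by_cases hipos : i = pos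
          · exact absurd (by rw [hipos]) hpne
          · rw [pv_getD_set_ne heap pos i _ (fun h => hipos h.symm)]
            by_cases hpari : (i - 1) / 2 = pos
            · rw [hpari, pv_getD_set_self heap pos _ hp]
              exact (hb i h0 hlen hpari).2 h1
            · rw [pv_getD_set_ne heap pos ((i - 1) / 2) _ (fun h => hpari h.symm)]
              exact ha i h0 hlen hipos hpari
        · intro j h0 hlen hpj
          simp only [List.length_set] at hlen
          constructor
          · by_cases hjpos : j = pos
            · rw [hjpos, pv_getD_set_self heap pos _ hp]
              exact le_of_lt h2
            · rw [pv_getD_set_ne heap pos j _ (fun h => hjpos h.symm)]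
              have h3 := ha j h0 hlen hjpos (by omega)
              rw [hpj] at h3
              exact le_trans (le_of_lt h2) h3
          · intro hppos
            rw [pv_getD_set_ne heap pos (((pos - 1) / 2 - 1) / 2) _ (by omega)]
            by_cases hjpos : j = pos
            · rw [hjpos, pv_getD_set_self heap pos _ hp]
              exact ha ((pos - 1) / 2) hppos (by omega) (by omega) (by omega)
            · rw [pv_getD_set_ne heap pos j _ (fun h => hjpos h.symm)]
              have h3 := ha ((pos - 1) / 2) hppos (by omega) (by omega) (by omega)
              have h4 := ha j h0 hlen hjpos (by omega)
              rw [hpj] at h4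
              exact le_trans h3 h4
      · simp only [if_neg h2]
        intro i h0 hlen
        simp only [List.length_set] at hlen
        by_cases hipos : i = pos
        · subst hipos
          rw [pv_getD_set_ne heap i ((i - 1) / 2) _ (by omega),
              pv_getD_set_self heap i _ hp]
          exact le_of_not_gt h2
        · by_cases hpari : (i - 1) / 2 = pos
          · rw [hpari, pv_getD_set_self heap pos _ hp,
                pv_getD_set_ne heap pos i _ (fun h => hipos h.symm)]
            exact (hb i h0 hlen hpari).1
          · rw [pv_getD_set_ne heap pos ((i - 1) / 2) _ (fun h => hpari h.symm),
                pv_getD_set_ne heap pos i _ (fun h => hipos h.symm)]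
            exact ha i h0 hlen hipos hpari
    · simp only [dif_neg h1]
      have hpos0 : pos = 0 := by omega
      subst hpos0
      intro i h0 hlen
      simp only [List.length_set] at hlen
      by_cases hpari : (i - 1) / 2 = 0
      · rw [hpari, pv_getD_set_self heap 0 _ hp,
            pv_getD_set_ne heap 0 i _ (by omega)]
        exact (hb i h0 hlen hpari).1
      · rw [pv_getD_set_ne heap 0 ((i - 1) / 2) _ (by omega),
            pv_getD_set_ne heap 0 i _ (by omega)]
        exact ha i h0 hlen (by omega) hpari

def pvSUInv (h : List Int) (pos : Nat) : Prop :=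
  (∀ i, 0 < i → i < h.length → i ≠ pos → (i - 1) / 2 ≠ pos →
      h.getD ((i - 1) / 2) 0 ≤ h.getD i 0) ∧
  (0 < pos → ∀ j, 0 < j → j < h.length → (j - 1) / 2 = pos →
      h.getD ((pos - 1) / 2) 0 ≤ h.getD j 0)

theorem pv_siftupLoop_heap : ∀ (n : Nat) (heap : List Int) (pos : Nat) (newitem : Int),
    heap.length - pos = n → pos < heap.length → pvSUInv heap pos →
    pvIsHeap (pvSiftupLoop heap 0 pos newitem) := by
  intro n
  induction n using Nat.strong_induction_on with
  | _ n ih =>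
    intro heap pos newitem hn hp hinv
    obtain ⟨ha, hb⟩ := hinv
    unfold pvSiftupLoop
    by_cases h1 : 2 * pos + 1 < heap.length
    · simp only [dif_pos h1]
      by_cases h2 : 2 * pos + 1 + 1 < heap.length ∧
          ¬ heap.getD (2 * pos + 1) 0 < heap.getD (2 * pos + 1 + 1) 0
      · -- chosen child c = 2*pos+2 (right), minimal among the two children
        simp only [if_pos h2]
        apply ih (heap.length - (2 * pos + 1 + 1)) (by omega) _ _ newitem (by simp)
          (by simp; omega)
        constructor
        · intro i h0 hlen hne hpne
          simp only [List.length_set] at hlen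
          by_cases hipos : i = pos
          · subst hipos
            rw [pv_getD_set_ne heap i ((i - 1) / 2) _ (by omega),
                pv_getD_set_self heap i _ hp]
            exact hb h0 (2 * i + 1 + 1) (by omega) h2.1 (by omega)
          · rw [pv_getD_set_ne heap pos i _ (fun h => hipos h.symm)]
            by_cases hpari : (i - 1) / 2 = pos
            · rw [hpari, pv_getD_set_self heap pos _ hp]
              have hi' : i = 2 * pos + 1 := by omega
              subst hi'
              exact le_of_not_gt h2.2
            · rw [pv_getD_set_ne heap pos ((i - 1) / 2) _ (fun h => hpari h.symm)]
              exact ha i h0 hlen hipos hpari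
        · intro _ j h0 hjlen hpjc
          simp only [List.length_set] at hjlen
          rw [(by omega : (2 * pos + 1 + 1 - 1) / 2 = pos), pv_getD_set_self heap pos _ hp,
              pv_getD_set_ne heap pos j _ (by omega)]
          have h4 := ha j h0 hjlen (by omega) (by omega)
          rw [hpjc] at h4
          exact h4
      · -- chosen child c = 2*pos+1 (left), minimal among the existing children
        simp only [if_neg h2]
        apply ih (heap.length - (2 * pos + 1)) (by omega) _ _ newitem (by simp)
          (by simp; omega)
        constructor
        · intro i h0 hlen hne hpne
          simp only [List.length_set] at hlen
          by_cases hipos : i = pos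
          · subst hipos
            rw [pv_getD_set_ne heap i ((i - 1) / 2) _ (by omega),
                pv_getD_set_self heap i _ hp]
            exact hb h0 (2 * i + 1) (by omega) h1 (by omega)
          · rw [pv_getD_set_ne heap pos i _ (fun h => hipos h.symm)]
            by_cases hpari : (i - 1) / 2 = pos
            · rw [hpari, pv_getD_set_self heap pos _ hp]
              have hi' : i = 2 * pos + 1 + 1 := by omega
              subst hi'
              have hlt : heap.getD (2 * pos + 1) 0 < heap.getD (2 * pos + 1 + 1) 0 := by
                rcases Decidable.not_and_iff_not_or_not.mp h2 with hc | hc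
                · exact absurd hlen hc
                · exact Decidable.not_not.mp hc
              exact le_of_lt hlt
            · rw [pv_getD_set_ne heap pos ((i - 1) / 2) _ (fun h => hpari h.symm)]
              exact ha i h0 hlen hipos hpari
        · intro _ j h0 hjlen hpjc
          simp only [List.length_set] at hjlen
          rw [(by omega : (2 * pos + 1 - 1) / 2 = pos), pv_getD_set_self heap pos _ hp,
              pv_getD_set_ne heap pos j _ (by omega)]
          have h4 := ha j h0 hjlen (by omega) (by omega)
          rw [hpjc] at h4
          exact h4
    · simp only [dif_neg h1]
      apply pv_siftdownLoop_heap pos _ newitem (by simpa using hp)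
      constructor
      · intro i h0 hlen hne hpne
        simp only [List.length_set] at hlen
        rw [pv_getD_set_ne heap pos i _ (fun h => hne h.symm),
            pv_getD_set_ne heap pos ((i - 1) / 2) _ (fun h => hpne h.symm)]
        exact ha i h0 hlen hne hpne
      · intro j h0 hlen hpj
        simp only [List.length_set] at hlen
        omega

-- heappush: multiset and heap property
theorem pv_getD_append_last (h : List Int) (item : Int) :
    (h ++ [item]).getD h.length 0 = item := by
  simp [List.getD_eq_getElem?_getD]

theorem pv_push_mset (h : List Int) (item : Int) :
    (↑(pvHeappush h item) : Multiset Int) = item ::ₘ (↑h : Multiset Int) := by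
  unfold pvHeappush pvSiftdown
  rw [pv_getD_append_last,
      pv_siftdownLoop_mset h.length _ 0 item (by simp),
      pv_mset_set _ _ _ (by simp), pv_getD_append_last]
  have hcoe : (↑(h ++ [item]) : Multiset Int) = item ::ₘ (↑h : Multiset Int) := by
    simp
  rw [hcoe, Multiset.erase_cons_head]

theorem pv_push_heap (h : List Int) (item : Int) (hh : pvIsHeap h) :
    pvIsHeap (pvHeappush h item) := by
  unfold pvHeappush pvSiftdown
  rw [pv_getD_append_last]
  apply pv_siftdownLoop_heap h.length _ item (by simp)
  constructor
  · intro i h0 hlen hne hpne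
    simp only [List.length_append, List.length_cons, List.length_nil] at hlen
    have hi : i < h.length := by omega
    rw [List.getD_append _ _ _ _ (by omega), List.getD_append _ _ _ _ hi]
    exact hh i h0 hi
  · intro j h0 hlen hpj
    simp only [List.length_append, List.length_cons, List.length_nil] at hlen
    omega

-- heappop on a nonempty heap: returns the root; the rest is a heap with the root erased
theorem pv_getD_dropLast (h : List Int) (i : Nat) (hi : i < h.length - 1) :
    h.dropLast.getD i 0 = h.getD i 0 := by
  have h1 : i < h.dropLast.length := by simp; omega
  have h2 : i < h.length := by omega
  rw [List.getD_eq_getElem _ 0 h1, List.getD_eq_getElem _ 0 h2, List.getElem_dropLast]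

theorem pv_pop_spec (h : List Int) (hh : pvIsHeap h) (hne : h ≠ []) :
    (pvHeappop h).1 = h.getD 0 0 ∧ pvIsHeap (pvHeappop h).2 ∧
      (↑(pvHeappop h).2 : Multiset Int) = (↑h : Multiset Int).erase (h.getD 0 0) := by
  unfold pvHeappop
  by_cases h1 : h.dropLast ≠ []
  · simp only [if_pos h1]
    have hlen2 : 2 ≤ h.length := by
      by_contra hcon
      apply h1
      apply List.eq_nil_of_length_eq_zero
      simp only [List.length_dropLast]
      omega
    have hr0 : h.dropLast.getD 0 0 = h.getD 0 0 := pv_getD_dropLast h 0 (by omega)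
    have hdl : 0 < h.dropLast.length := by simp; omega
    have hlast : h.getLast?.getD 0 = h.getLast hne := by
      rw [List.getLast?_eq_some_getLast hne]; rfl
    refine ⟨hr0, ?_, ?_⟩
    · apply pv_siftupLoop_heap ((h.dropLast.set 0 (h.getLast?.getD 0)).length - 0) _ 0 _
        rfl (by simpa using hdl)
      constructor
      · intro i h0 hlen hne' hpne
        simp only [List.length_set, List.length_dropLast] at hlen
        rw [pv_getD_set_ne _ 0 i _ (by omega), pv_getD_set_ne _ 0 ((i - 1) / 2) _ (by omega),
            pv_getD_dropLast h i (by omega), pv_getD_dropLast h ((i - 1) / 2) (by omega)]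
        exact hh i h0 (by omega)
      · intro h0; omega
    · rw [pv_siftupLoop_mset ((h.dropLast.set 0 (h.getLast?.getD 0)).length - 0) _ 0 0 _
          rfl (by simpa using hdl), List.set_set,
          pv_mset_set _ 0 _ (by simpa using hdl), hr0]
      have hsplit : (↑h : Multiset Int) =
          (↑h.dropLast : Multiset Int) + {h.getLast?.getD 0} := by
        rw [hlast]
        conv_lhs => rw [← List.dropLast_concat_getLast hne]
        rw [← Multiset.coe_singleton, Multiset.coe_add]
      rw [hsplit]
      have hmem : h.getD 0 0 ∈ (↑h.dropLast : Multiset Int) := by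
        rw [← hr0]
        have : h.dropLast.getD 0 0 = h.dropLast[0]'hdl := List.getD_eq_getElem _ 0 hdl
        rw [this]
        exact Multiset.mem_coe.mpr (List.getElem_mem hdl)
      rw [Multiset.erase_add_left_pos _ hmem]
      rw [Multiset.add_comm, Multiset.singleton_add]
  · simp only [if_neg h1]
    have h1' : h.dropLast = [] := Decidable.not_not.mp h1
    rcases h with _ | ⟨a, t⟩
    · exact absurd rfl hne
    · have ht : t = [] := by
        have := congrArg List.length h1'
        simp at this
        exact this
      subst ht
      refine ⟨rfl, ?_, ?_⟩
      · rw [h1']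
        intro i h0 hlen
        simp at hlen
      · rw [h1']
        simp

-- the simulation relation between A's state and B's state
def pvInv (stA stB : List Int × Int) : Prop :=
  pvIsHeap stA.1 ∧
  (↑stA.1 : Multiset Int) = ↑(stB.1.map (fun x => -x)) ∧
  stA.2 = stB.2

theorem pv_step (ordenes : List (Int × Int)) (stA stB : List Int × Int) (i : Int)
    (hI : pvInv stA stB) : pvInv (pvStepA ordenes stA i) (pvStepB ordenes stB i) := by
  obtain ⟨hA, tA⟩ := stA
  obtain ⟨hB, tB⟩ := stB
  obtain ⟨hH, hM, hT⟩ := hI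
  simp only at hH hM hT
  subst hT
  unfold pvStepA pvStepB
  simp only
  set o := PySem.List.pyGetD ordenes i (0, 0) with ho
  have hH1 : pvIsHeap (pvHeappush hA (-o.1)) := pv_push_heap hA _ hH
  have hM1 : (↑(pvHeappush hA (-o.1)) : Multiset Int) =
      ↑((hB ++ [o.1]).map (fun x => -x)) := by
    rw [pv_push_mset, hM]
    simp only [List.map_append, List.map_cons, List.map_nil]
    exact Multiset.coe_eq_coe.mpr (List.perm_append_singleton _ _).symm
  by_cases hc : tA + o.1 > o.2
  · simp only [if_pos hc]
    -- the accepted list is nonempty, so max() returns its maximum m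
    have hlen : (pvHeappush hA (-o.1)).length = hB.length + 1 := by
      have := congrArg Multiset.card hM1
      simpa using this
    have hne : pvHeappush hA (-o.1) ≠ [] := by
      intro h; rw [h] at hlen; simp at hlen
    obtain ⟨m, hm⟩ : ∃ m, PySem.List.max? (hB ++ [o.1]) (fun x => x) = some m := by
      cases hmx : PySem.List.max? (hB ++ [o.1]) (fun x => x) with
      | none => exact absurd ((PySem.List.max?_eq_none_iff _ _).mp hmx) (by simp)
      | some m => exact ⟨m, rfl⟩
    have hmmem : m ∈ hB ++ [o.1] := PySem.List.max?_mem hm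
    have hmmax : ∀ y ∈ hB ++ [o.1], y ≤ m := fun y hy => PySem.List.max?_isMax hm y hy
    have hpop := pv_pop_spec _ hH1 hne
    -- the popped root is -m
    have hroot : (pvHeappush hA (-o.1)).getD 0 0 = -m := by
      apply le_antisymm
      · apply pv_root_le_mem _ hH1
        rw [← Multiset.mem_coe, hM1, Multiset.mem_coe]
        exact List.mem_map_of_mem hmmem
      · have hmem0 : (pvHeappush hA (-o.1)).getD 0 0 ∈ pvHeappush hA (-o.1) := by
          have h0 : 0 < (pvHeappush hA (-o.1)).length := by omega
          rw [List.getD_eq_getElem _ 0 h0]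
          exact List.getElem_mem h0
        rw [← Multiset.mem_coe, hM1, Multiset.mem_coe] at hmem0
        obtain ⟨y, hy, hyeq⟩ := List.mem_map.mp hmem0
        rw [← hyeq]
        exact neg_le_neg (hmmax y hy)
    have hrem : (PySem.List.remove? (hB ++ [o.1]) m).getD (hB ++ [o.1]) =
        (hB ++ [o.1]).erase m := by
      rw [PySem.List.remove?_eq_some_erase _ m hmmem]; rfl
    rw [hm]
    simp only [Option.getD_some]
    rw [hrem]
    refine ⟨hpop.2.1, ?_, ?_⟩
    · dsimp only
      rw [hpop.2.2, hM1, hroot]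
      have hme : ((hB ++ [o.1]).erase m).map (fun x : Int => -x) =
          ((hB ++ [o.1]).map (fun x : Int => -x)).erase (-m) :=
        List.map_erase neg_injective _
      rw [hme, Multiset.coe_erase]
    · dsimp only
      rw [hpop.1, hroot]
      ring
  · simp only [if_neg hc]
    exact ⟨hH1, hM1, rfl⟩

theorem pv_fold (ordenes : List (Int × Int)) (l : List Int) (stA stB : List Int × Int)
    (hI : pvInv stA stB) :
    pvInv (l.foldl (pvStepA ordenes) stA) (l.foldl (pvStepB ordenes) stB) := by
  induction l generalizing stA stB with
  | nil => exact hI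
  | cons x xs ih => exact ih _ _ (pv_step ordenes stA stB x hI)

-- ===== VERDICT (by name: the statement is the Claim_ definition above) =====
theorem customer_spec : Claim_equal_customer := by
  intro ordenes cantidad _ _
  unfold Spec_customer customer customer_alt
  have h := pv_fold ordenes (PySem.List.pyRange 0 cantidad 1) ([], 0) ([], 0)
    ⟨by intro i h0 hl; simp at hl, by simp, rfl⟩
  have hc := congrArg Multiset.card h.2.1
  simp only [Multiset.coe_card, List.length_map] at hc
  exact_mod_cast congrArg (Int.ofNat) hc
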